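-- pv_equiv track=rewrite | github.com/wishjsh/Programmers | 프로그래머스/1/389478. 택배 상자 꺼내기/택배 상자 꺼내기.py | box_set
-- ===== SOURCE A (Python) =====
-- def box_set(n, w, index, direction):
--     a = []
--
--     if(direction == 0):
--         for i in range(index, w+index):
--             if(i > n):
--                 a.append(0)
--                 continue
--             a.append(i)
--
--     if(direction == 1):
--         for i in range(w+index-1, index-1, -1):
--             if(i > n):
--                 a.append(0)
--                 continue
--             a.append(i)
--
--     return a
-- ===== SOURCE B (Python) =====
-- def box_set(n, w, index, direction):
--     if direction != 0 and direction != 1: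
--         return []
--     # boxes with label > n become 0; range(index, w+index) is increasing,
--     # so the kept labels are exactly range(index, k) with k = clamp(n+1)
--     k = max(index, min(n + 1, w + index))
--     kept = list(range(index, k))
--     zeros = [0] * (w + index - k)
--     if direction == 0:
--         return kept + zeros
--     return zeros + kept[::-1]
-- ===== Notes on version B (the rewrite author's own statement) =====
-- stated objective: alternative
-- what changed: B replaces A's per-element conditional loops by a closed-form arithmetic split: it computes the cutoff k = max(index, min(n+1, w+index)) once, builds the kept labels as one range and the zeros as a replicated block, and concatenates them (reversed placement for direction 1), with no per-element test at all.
import Mathlib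
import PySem

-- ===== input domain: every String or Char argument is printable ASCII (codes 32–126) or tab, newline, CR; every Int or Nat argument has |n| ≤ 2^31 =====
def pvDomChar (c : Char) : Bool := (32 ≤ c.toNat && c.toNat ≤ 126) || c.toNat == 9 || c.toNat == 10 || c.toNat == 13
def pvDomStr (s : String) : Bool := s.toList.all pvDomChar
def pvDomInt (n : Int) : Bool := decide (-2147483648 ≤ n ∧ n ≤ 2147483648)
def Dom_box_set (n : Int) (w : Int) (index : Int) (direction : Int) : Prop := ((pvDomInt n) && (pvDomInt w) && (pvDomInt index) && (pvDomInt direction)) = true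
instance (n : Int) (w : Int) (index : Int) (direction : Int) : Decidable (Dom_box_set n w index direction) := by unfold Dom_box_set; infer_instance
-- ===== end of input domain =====

-- B builds the answer by an arithmetic split (one range of kept labels + one replicated zero block) instead of A's two per-element conditional loops (alternative decomposition).


-- ===== PORT A =====
def box_set (n : Int) (w : Int) (index : Int) (direction : Int) : List Int :=
  let a : List Int := []
  let a := if direction = 0 then
      (PySem.List.pyRange index (w + index) 1).foldl
        (fun acc i => if i > n then acc ++ [0] else acc ++ [i]) a
    else a
  let a := if direction = 1 then
      (PySem.List.pyRange (w + index - 1) (index - 1) (-1)).foldl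
        (fun acc i => if i > n then acc ++ [0] else acc ++ [i]) a
    else a
  a

-- ===== PORT B =====
def box_set_alt (n : Int) (w : Int) (index : Int) (direction : Int) : List Int :=
  if direction ≠ 0 ∧ direction ≠ 1 then []
  else
    let k := max index (min (n + 1) (w + index))
    let kept := PySem.List.pyRange index k 1
    let zeros := List.replicate (w + index - k).toNat (0 : Int)
    if direction = 0 then kept ++ zeros else zeros ++ kept.reverse

-- ===== PRECONDITION & SPEC =====
def Spec_box_set (n : Int) (w : Int) (index : Int) (direction : Int) (out : List Int) : Prop := out = box_set_alt n w index direction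
instance (n : Int) (w : Int) (index : Int) (direction : Int) (out : List Int) : Decidable (Spec_box_set n w index direction out) := by unfold Spec_box_set; infer_instance

-- ===== CLAIM (what is proved, stated in full; the proofs are below) =====
def Claim_equal_box_set : Prop := ∀ (n : Int) (w : Int) (index : Int) (direction : Int), Dom_box_set n w index direction → Spec_box_set n w index direction (box_set n w index direction)

-- ===== LEMMAS AND PROOFS =====

-- A's conditional append-loop over any list equals a map.
theorem pv_fold_eq_map (n : Int) (r : List Int) :
    r.foldl (fun acc i => if i > n then acc ++ [0] else acc ++ [i]) [] =
    r.map (fun i => if i ≤ n then i else 0) := by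
  have := PySem.List.foldl_append_singleton_eq_map
    (f := fun i : Int => if i ≤ n then i else 0) (l := r) (acc := ([] : List Int))
  simp only [List.nil_append] at this
  rw [← this]
  apply PySem.List.foldl_congr_mem
  intro acc i _
  by_cases h : i > n
  · simp [h, not_le.mpr h]
  · simp [h, not_lt.mp h]

-- The mapped increasing range splits into the kept prefix and a zero block.
theorem pv_map_split (n a b : Int) :
    (PySem.List.pyRange a b 1).map (fun i => if i ≤ n then i else 0) =
    PySem.List.pyRange a (max a (min (n + 1) b)) 1 ++
      List.replicate (b - max a (min (n + 1) b)).toNat (0 : Int) := by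
  set m := max a (min (n + 1) b) with hm
  by_cases hab : b ≤ a
  · have h1 : PySem.List.pyRange a b 1 = [] := PySem.List.pyRange_one_eq_nil hab
    have h2 : PySem.List.pyRange a m 1 = [] := by
      apply PySem.List.pyRange_one_eq_nil; omega
    have h3 : (b - m).toNat = 0 := by omega
    simp [h1, h2, h3]
  · have ham : a ≤ m := le_max_left _ _
    have hmb : m ≤ b := by omega
    rw [PySem.List.pyRange_one_append a m b ham hmb, List.map_append]
    congr 1
    · apply List.map_congr_left _ |>.trans (List.map_id _)
      intro i hi
      rw [PySem.List.mem_pyRange_one] at hi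
      have : i ≤ n := by omega
      simp [this]
    · apply List.eq_replicate_iff.mpr
      constructor
      · simp [PySem.List.length_pyRange_one]
      · intro x hx
        simp only [List.mem_map] at hx
        obtain ⟨i, hi, hxi⟩ := hx
        rw [PySem.List.mem_pyRange_one] at hi
        have : ¬ i ≤ n := by omega
        simp [this] at hxi
        omega

-- ===== VERDICT (by name: the statement is the Claim_ definition above) =====
theorem box_set_spec : Claim_equal_box_set := by
  intro n w index direction _
  unfold Spec_box_set box_set box_set_alt
  by_cases h0 : direction = 0
  · simp [h0, pv_fold_eq_map, pv_map_split]
  · by_cases h1 : direction = 1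
    · have hr : PySem.List.pyRange (w + index - 1) (index - 1) (-1) =
          (PySem.List.pyRange index (w + index) 1).reverse := by
        rw [PySem.List.pyRange_neg_one_eq_reverse]
        congr 1; ring_nf
      simp only [h1, hr]
      rw [if_neg (show ¬((1:Int) = 0) by norm_num)]
      rw [if_pos trivial]
      rw [if_neg (show ¬(((1:Int) ≠ 0) ∧ ((1:Int) ≠ 1)) by norm_num)]
      rw [if_neg (show ¬((1:Int) = 0) by norm_num)]
      rw [pv_fold_eq_map n, List.map_reverse, pv_map_split, List.reverse_append,
        List.reverse_replicate]
    · simp [h0, h1]
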